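-- pv_equiv track=rewrite | github.com/dlwlals1289/Sol_Algorithm | 프로그래머스/1/67256. ［카카오 인턴］ 키패드 누르기/［카카오 인턴］ 키패드 누르기.py | solution
-- ===== SOURCE A (Python) =====
-- keypad = [[1,2,3],[4,5,6],[7,8,9],[-1,0,-1]]
--
-- def find_index(target):
--     for row, arr in enumerate(keypad):
--         for col, value in enumerate(arr):
--             if value == target:
--                 return [row, col]
--
-- def solution(numbers, hand):
--     answer = ''
--
--     left = [3,0]
--     right = [3,2]
--
--     for num in numbers:
--         r, c = find_index(num)[0], find_index(num)[1]
--         distance_from_left = abs(left[0] - r) + abs(left[1] - c)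
--         distance_from_right = abs(right[0] - r) + abs(right[1] - c)
--
--         if c == 0: # 1,4,7
--             answer += 'L'
--             left = [r,c]
--             continue
--         elif c == 2: # 3, 6, 9
--             answer += 'R'
--             right = [r,c]
--             continue
--         else:
--             if distance_from_left < distance_from_right : # 왼손과 더 가까울 때
--                 answer += 'L'
--                 left = [r,c]
--                 continue
--             elif distance_from_left > distance_from_right : # 오른손과 더 가까울 때
--                 answer += 'R'
--                 right = [r,c]
--                 continue
--             elif distance_from_left == distance_from_right :
--                 if hand == 'left':
--                     answer += 'L'
--                     left = [r,c]
--                 else: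
--                     answer += 'R'
--                     right = [r,c]
--
--     return answer
-- ===== SOURCE B (Python) =====
-- # Table-driven finite state machine: the whole per-key decision logic is
-- # precomputed once into a 2880-entry transition table indexed by
-- # (left key, right key, digit, hand preference); the main loop is a pure
-- # table lookup with no arithmetic or branching.
--
-- _LSTART, _RSTART = 10, 11   # virtual keys for the thumbs' starting corners
--
--
-- def _pos(k):
--     if k == 0:
--         return (3, 1)
--     if k == _LSTART:
--         return (3, 0)
--     if k == _RSTART:
--         return (3, 2)
--     return ((k - 1) // 3, (k - 1) % 3)
--
--
-- def _entry(i):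
--     # decode table index -> (l, r, n, pref)
--     i, pref = divmod(i, 2)
--     i, n = divmod(i, 10)
--     l, r = divmod(i, 12)
--     lr, lc = _pos(l)
--     rr, rc = _pos(r)
--     nr, nc = _pos(n)
--     if nc == 0:
--         move = 'L'
--     elif nc == 2:
--         move = 'R'
--     else:
--         dl = abs(lr - nr) + abs(lc - nc)
--         dr = abs(rr - nr) + abs(rc - nc)
--         move = 'L' if dl < dr or (dl == dr and pref == 1) else 'R'
--     return (move, n, r) if move == 'L' else (move, l, n)
--
--
-- _STEP = [_entry(i) for i in range(2880)]
--
--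
-- def solution(numbers, hand):
--     l, r = _LSTART, _RSTART
--     pref = 1 if hand == 'left' else 0
--     out = []
--     for n in numbers:
--         move, l, r = _STEP[((l * 12 + r) * 10 + n) * 2 + pref]
--         out.append(move)
--     return ''.join(out)
-- ===== Notes on version B (the rewrite author's own statement) =====
-- stated objective: alternative
-- what changed: Replaces the per-digit grid scan and five-way branch chain by a precomputed 2880-entry finite-state transition table indexed by (left key, right key, digit, hand preference): the main loop keeps key labels instead of coordinate pairs and does a single table lookup per digit, with no arithmetic or branching in the loop.
-- outside the precondition, e.g. on solution([-1], 'right'): A returns 'L', B returns 'R'; on solution([10], 'left'): A raises TypeError, B returns 'R'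
import Mathlib
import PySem

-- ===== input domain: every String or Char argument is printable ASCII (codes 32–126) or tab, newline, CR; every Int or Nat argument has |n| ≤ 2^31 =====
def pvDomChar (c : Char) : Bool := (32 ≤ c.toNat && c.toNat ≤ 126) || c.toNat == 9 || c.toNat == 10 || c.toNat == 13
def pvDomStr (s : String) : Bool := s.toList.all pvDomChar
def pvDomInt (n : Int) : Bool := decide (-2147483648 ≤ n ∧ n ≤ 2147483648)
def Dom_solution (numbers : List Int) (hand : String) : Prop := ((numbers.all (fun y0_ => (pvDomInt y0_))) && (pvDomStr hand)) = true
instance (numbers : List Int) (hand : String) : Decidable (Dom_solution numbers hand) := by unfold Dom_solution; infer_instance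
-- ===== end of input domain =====

-- ===== PORT A =====
-- B replaces the grid scan and branch chain by a precomputed transition table (alternative structure).
-- Port of A's module-level keypad and find_index (nested enumerate scan).
def keypad : List (List Int) := [[1,2,3],[4,5,6],[7,8,9],[-1,0,-1]]

def fiCol (row col : Int) (arr : List Int) (target : Int) : Option (List Int) :=
  match arr with
  | [] => none
  | v :: rest => if v = target then some [row, col] else fiCol row (col + 1) rest target

def fiRow (row : Int) (rows : List (List Int)) (target : Int) : Option (List Int) :=
  match rows with
  | [] => none
  | arr :: rest =>
    match fiCol row 0 arr target with
    | some p => some p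
    | none => fiRow (row + 1) rest target

def find_index (target : Int) : Option (List Int) := fiRow 0 keypad target

def solutionLoop (hand : String) : List Int → String → List Int → List Int → String
  | [], answer, _, _ => answer
  | num :: rest, answer, left, right =>
    match find_index num with
    | none => answer  -- Python raises TypeError here (None[0]); outside Pre_solution
    | some p =>
      let r := p.getD 0 0
      let c := p.getD 1 0
      let distance_from_left := |left.getD 0 0 - r| + |left.getD 1 0 - c|
      let distance_from_right := |right.getD 0 0 - r| + |right.getD 1 0 - c|
      if c = 0 then solutionLoop hand rest (answer ++ "L") [r, c] right
      else if c = 2 then solutionLoop hand rest (answer ++ "R") left [r, c]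
      else if distance_from_left < distance_from_right then
        solutionLoop hand rest (answer ++ "L") [r, c] right
      else if distance_from_left > distance_from_right then
        solutionLoop hand rest (answer ++ "R") left [r, c]
      else if distance_from_left = distance_from_right then
        (if hand = "left" then solutionLoop hand rest (answer ++ "L") [r, c] right
         else solutionLoop hand rest (answer ++ "R") left [r, c])
      else solutionLoop hand rest answer left right  -- unreachable fall-through of the elif chain

def solution (numbers : List Int) (hand : String) : String :=
  solutionLoop hand numbers "" [3, 0] [3, 2]

-- ===== PORT B =====
-- Source B's _pos: key -> keypad coordinates (10 = left start corner, 11 = right start corner)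
def posK (k : Int) : Int × Int :=
  if k = 0 then (3, 1)
  else if k = 10 then (3, 0)
  else if k = 11 then (3, 2)
  else (PySem.Int.floordiv (k - 1) 3, PySem.Int.mod (k - 1) 3)

-- Source B's _entry: decode a table index and compute (move, new left key, new right key)
def entryB (i : Int) : String × Int × Int :=
  let i1 := PySem.Int.floordiv i 2
  let pref := PySem.Int.mod i 2
  let i2 := PySem.Int.floordiv i1 10
  let n := PySem.Int.mod i1 10
  let l := PySem.Int.floordiv i2 12
  let r := PySem.Int.mod i2 12
  let lp := posK l
  let rp := posK r
  let np := posK n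
  let move : String :=
    if np.2 = 0 then "L"
    else if np.2 = 2 then "R"
    else
      let dl := |lp.1 - np.1| + |lp.2 - np.2|
      let dr := |rp.1 - np.1| + |rp.2 - np.2|
      if dl < dr ∨ (dl = dr ∧ pref = 1) then "L" else "R"
  if move = "L" then (move, n, r) else (move, l, n)

-- Source B's _STEP = [_entry(i) for i in range(2880)]
def stepTable : List (String × Int × Int) :=
  (PySem.List.pyRange 0 2880 1).map entryB

def altLoop (pref : Int) : List Int → Int → Int → List String → List String
  | [], _, _, out => out
  | n :: rest, l, r, out =>
    match PySem.List.pyGet? stepTable (((l * 12 + r) * 10 + n) * 2 + pref) with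
    | none => out  -- Python IndexError; unreachable under Pre_solution
    | some (move, l', r') => altLoop pref rest l' r' (out ++ [move])

def solution_alt (numbers : List Int) (hand : String) : String :=
  let pref : Int := if hand = "left" then 1 else 0
  String.join (altLoop pref numbers 10 11 [])

-- ===== PRECONDITION & SPEC =====
-- Pre_ restricts to the task's natural domain, keypad digits 0..9: on any other number
-- find_index returns None and A raises TypeError, except the grid sentinel -1, where A's
-- 'L' is an accident of the sentinel's position in the grid (outside the task's domain).
def Pre_solution (numbers : List Int) (hand : String) : Prop :=
  ∀ n ∈ numbers, 0 ≤ n ∧ n ≤ 9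

instance (numbers : List Int) (hand : String) : Decidable (Pre_solution numbers hand) := by
  unfold Pre_solution; infer_instance

def pvWitness_solution : List Int × String := ([1, 3, 4, 5, 8, 2, 1, 4, 5, 9, 5], "right")

def Spec_solution (numbers : List Int) (hand : String) (out : String) : Prop := out = solution_alt numbers hand
instance (numbers : List Int) (hand : String) (out : String) : Decidable (Spec_solution numbers hand out) := by unfold Spec_solution; infer_instance

-- ===== CLAIM (what is proved, stated in full; the proofs are below) =====
def Claim_equal_solution : Prop := ∀ (numbers : List Int) (hand : String), Dom_solution numbers hand → Pre_solution numbers hand → Spec_solution numbers hand (solution numbers hand)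

-- ===== LEMMAS AND PROOFS =====
theorem join_snoc (out : List String) (s : String) :
    String.join (out ++ [s]) = String.join out ++ s := by
  simp [String.join, List.foldl_append]

-- table lookup at an in-range index is the generating function
set_option maxRecDepth 8192 in
theorem stepTable_get (i : Int) (h0 : 0 ≤ i) (h1 : i < 2880) :
    PySem.List.pyGet? stepTable i = some (entryB i) := by
  rw [PySem.List.pyGet?_of_nonneg _ h0]
  have hlen : i.toNat < stepTable.length := by
    unfold stepTable
    rw [List.length_map, PySem.List.length_pyRange_one]; omega
  rw [List.getElem?_eq_getElem hlen]
  congr 1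
  unfold stepTable
  rw [List.getElem_map, PySem.List.getElem_pyRange_one]
  congr 1
  omega

-- decoding the encoded index recovers the state: the table entry is the step function, split by case
theorem entryB_encode (l r n pref : Int)
    (hl0 : 0 ≤ l) (hl : l < 12) (hr0 : 0 ≤ r) (hr : r < 12)
    (hn0 : 0 ≤ n) (hn : n < 10) (hp0 : 0 ≤ pref) (hp : pref < 2) :
    entryB (((l * 12 + r) * 10 + n) * 2 + pref) =
      (if (posK n).2 = 0 then ("L", n, r)
       else if (posK n).2 = 2 then ("R", l, n)
       else if |(posK l).1 - (posK n).1| + |(posK l).2 - (posK n).2|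
                 < |(posK r).1 - (posK n).1| + |(posK r).2 - (posK n).2|
               ∨ (|(posK l).1 - (posK n).1| + |(posK l).2 - (posK n).2|
                    = |(posK r).1 - (posK n).1| + |(posK r).2 - (posK n).2| ∧ pref = 1)
         then ("L", n, r) else ("R", l, n)) := by
  have e2 : PySem.Int.floordiv (((l * 12 + r) * 10 + n) * 2 + pref) 2 = (l * 12 + r) * 10 + n := by
    rw [PySem.Int.floordiv_eq_ediv_of_pos (by omega)]; omega
  have m2 : PySem.Int.mod (((l * 12 + r) * 10 + n) * 2 + pref) 2 = pref := by
    rw [PySem.Int.mod_eq_emod_of_pos (by omega)]; omega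
  have e10 : PySem.Int.floordiv ((l * 12 + r) * 10 + n) 10 = l * 12 + r := by
    rw [PySem.Int.floordiv_eq_ediv_of_pos (by omega)]; omega
  have m10 : PySem.Int.mod ((l * 12 + r) * 10 + n) 10 = n := by
    rw [PySem.Int.mod_eq_emod_of_pos (by omega)]; omega
  have e12 : PySem.Int.floordiv (l * 12 + r) 12 = l := by
    rw [PySem.Int.floordiv_eq_ediv_of_pos (by omega)]; omega
  have m12 : PySem.Int.mod (l * 12 + r) 12 = r := by
    rw [PySem.Int.mod_eq_emod_of_pos (by omega)]; omega
  simp only [entryB, e2, m2, e10, m10, e12, m12]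
  by_cases hA : (posK n).2 = 0
  · simp [hA]
  · by_cases hB : (posK n).2 = 2
    · simp [hA, hB]
    · by_cases hC : |(posK l).1 - (posK n).1| + |(posK l).2 - (posK n).2|
            < |(posK r).1 - (posK n).1| + |(posK r).2 - (posK n).2|
          ∨ (|(posK l).1 - (posK n).1| + |(posK l).2 - (posK n).2|
               = |(posK r).1 - (posK n).1| + |(posK r).2 - (posK n).2| ∧ pref = 1)
      · simp [hA, hB, hC]
      · simp [hA, hB, hC]

-- the altLoop recursive call on a branching table entry, split on the condition
theorem altStep (C : Prop) [Decidable C] (pref : Int) (rest : List Int) (n0 l r : Int)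
    (out : List String) :
    String.join (altLoop pref rest (if C then ("L", n0, r) else ("R", l, n0)).2.1
      (if C then ("L", n0, r) else ("R", l, n0)).2.2
      (out ++ [(if C then ("L", n0, r) else ("R", l, n0)).1]))
    = if C then String.join (altLoop pref rest n0 r (out ++ ["L"]))
      else String.join (altLoop pref rest l n0 (out ++ ["R"])) := by
  by_cases h : C <;> simp [h]

-- the middle-column branch chains of A and B agree, given equal leaves
theorem branch_eq (dl dr : Int) (P : Prop) [Decidable P] (aL aR aX bL bR : String)
    (hL : aL = bL) (hR : aR = bR) :
    (if dl < dr then aL else if dr < dl then aR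
     else if dl = dr then (if P then aL else aR) else aX)
    = (if dl < dr ∨ (dl = dr ∧ P) then bL else bR) := by
  rcases lt_trichotomy dl dr with h | h | h
  · simp [h, hL]
  · subst h
    by_cases hh : P <;> simp [hh, hL, hR]
  · have h1 : ¬ dl < dr := by omega
    have h2 : dl ≠ dr := by omega
    simp [h1, h, h2, hR]

theorem posK_0 : posK 0 = ((3:Int), (1:Int)) := by decide
theorem posK_1 : posK 1 = ((0:Int), (0:Int)) := by decide
theorem posK_2 : posK 2 = ((0:Int), (1:Int)) := by decide
theorem posK_3 : posK 3 = ((0:Int), (2:Int)) := by decide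
theorem posK_4 : posK 4 = ((1:Int), (0:Int)) := by decide
theorem posK_5 : posK 5 = ((1:Int), (1:Int)) := by decide
theorem posK_6 : posK 6 = ((1:Int), (2:Int)) := by decide
theorem posK_7 : posK 7 = ((2:Int), (0:Int)) := by decide
theorem posK_8 : posK 8 = ((2:Int), (1:Int)) := by decide
theorem posK_9 : posK 9 = ((2:Int), (2:Int)) := by decide
theorem posK_10 : posK 10 = ((3:Int), (0:Int)) := by decide
theorem posK_11 : posK 11 = ((3:Int), (2:Int)) := by decide

theorem loop_eq (hand : String) : ∀ (nums : List Int), (∀ n ∈ nums, 0 ≤ n ∧ n ≤ 9) →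
    ∀ (l r : Int) (out : List String), 0 ≤ l → l < 12 → 0 ≤ r → r < 12 →
    solutionLoop hand nums (String.join out) [(posK l).1, (posK l).2] [(posK r).1, (posK r).2]
      = String.join (altLoop (if hand = "left" then 1 else 0) nums l r out) := by
  intro nums
  induction nums with
  | nil => intro _ l r out _ _ _ _; simp [solutionLoop, altLoop]
  | cons n rest ih =>
    intro hpre l r out hl0 hl hr0 hr
    obtain ⟨h0, h9⟩ := hpre n (by simp)
    have hrest : ∀ m ∈ rest, 0 ≤ m ∧ m ≤ 9 := fun m hm => hpre m (by simp [hm])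
    have hp0 : (0:Int) ≤ (if hand = "left" then 1 else 0) := by split_ifs <;> omega
    have hp2 : (if hand = "left" then (1:Int) else 0) < 2 := by split_ifs <;> omega
    have hidx0 : (0:Int) ≤ ((l * 12 + r) * 10 + n) * 2 + (if hand = "left" then 1 else 0) := by
      nlinarith
    have hidx1 : ((l * 12 + r) * 10 + n) * 2 + (if hand = "left" then (1:Int) else 0) < 2880 := by
      nlinarith
    have hget := stepTable_get _ hidx0 hidx1
    have henc := entryB_encode l r n _ hl0 hl hr0 hr h0 (by omega) hp0 hp2
    have hpiff : ((if hand = "left" then (1:Int) else 0) = 1) = (hand = "left") := by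
      by_cases hh : hand = "left" <;> simp [hh]
    interval_cases n <;>
      simp only [altLoop, hget, henc, hpiff, solutionLoop, find_index, fiRow, fiCol, keypad,
        posK_0, posK_1, posK_2, posK_3, posK_4, posK_5, posK_6, posK_7, posK_8, posK_9, posK_10,
        posK_11, altStep, apply_ite String.join] <;>
      norm_num <;>
      first
      | (rw [← join_snoc]
         first
           | simpa [posK_0] using ih hrest (0:Int) r (out ++ ["L"]) (by norm_num) (by norm_num) hr0 hr
           | simpa [posK_0] using ih hrest l (0:Int) (out ++ ["R"]) hl0 hl (by norm_num) (by norm_num)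
           | simpa [posK_1] using ih hrest (1:Int) r (out ++ ["L"]) (by norm_num) (by norm_num) hr0 hr
           | simpa [posK_1] using ih hrest l (1:Int) (out ++ ["R"]) hl0 hl (by norm_num) (by norm_num)
           | simpa [posK_2] using ih hrest (2:Int) r (out ++ ["L"]) (by norm_num) (by norm_num) hr0 hr
           | simpa [posK_2] using ih hrest l (2:Int) (out ++ ["R"]) hl0 hl (by norm_num) (by norm_num)
           | simpa [posK_3] using ih hrest (3:Int) r (out ++ ["L"]) (by norm_num) (by norm_num) hr0 hr
           | simpa [posK_3] using ih hrest l (3:Int) (out ++ ["R"]) hl0 hl (by norm_num) (by norm_num)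
           | simpa [posK_4] using ih hrest (4:Int) r (out ++ ["L"]) (by norm_num) (by norm_num) hr0 hr
           | simpa [posK_4] using ih hrest l (4:Int) (out ++ ["R"]) hl0 hl (by norm_num) (by norm_num)
           | simpa [posK_5] using ih hrest (5:Int) r (out ++ ["L"]) (by norm_num) (by norm_num) hr0 hr
           | simpa [posK_5] using ih hrest l (5:Int) (out ++ ["R"]) hl0 hl (by norm_num) (by norm_num)
           | simpa [posK_6] using ih hrest (6:Int) r (out ++ ["L"]) (by norm_num) (by norm_num) hr0 hr
           | simpa [posK_6] using ih hrest l (6:Int) (out ++ ["R"]) hl0 hl (by norm_num) (by norm_num)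
           | simpa [posK_7] using ih hrest (7:Int) r (out ++ ["L"]) (by norm_num) (by norm_num) hr0 hr
           | simpa [posK_7] using ih hrest l (7:Int) (out ++ ["R"]) hl0 hl (by norm_num) (by norm_num)
           | simpa [posK_8] using ih hrest (8:Int) r (out ++ ["L"]) (by norm_num) (by norm_num) hr0 hr
           | simpa [posK_8] using ih hrest l (8:Int) (out ++ ["R"]) hl0 hl (by norm_num) (by norm_num)
           | simpa [posK_9] using ih hrest (9:Int) r (out ++ ["L"]) (by norm_num) (by norm_num) hr0 hr
           | simpa [posK_9] using ih hrest l (9:Int) (out ++ ["R"]) hl0 hl (by norm_num) (by norm_num))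
      | (rw [altStep]
         refine branch_eq _ _ (hand = "left") _ _ _ _ _ ?_ ?_ <;> rw [← join_snoc] <;>
           first
             | simpa [posK_0] using ih hrest (0:Int) r (out ++ ["L"]) (by norm_num) (by norm_num) hr0 hr
             | simpa [posK_0] using ih hrest l (0:Int) (out ++ ["R"]) hl0 hl (by norm_num) (by norm_num)
             | simpa [posK_1] using ih hrest (1:Int) r (out ++ ["L"]) (by norm_num) (by norm_num) hr0 hr
             | simpa [posK_1] using ih hrest l (1:Int) (out ++ ["R"]) hl0 hl (by norm_num) (by norm_num)
             | simpa [posK_2] using ih hrest (2:Int) r (out ++ ["L"]) (by norm_num) (by norm_num) hr0 hr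
             | simpa [posK_2] using ih hrest l (2:Int) (out ++ ["R"]) hl0 hl (by norm_num) (by norm_num)
             | simpa [posK_3] using ih hrest (3:Int) r (out ++ ["L"]) (by norm_num) (by norm_num) hr0 hr
             | simpa [posK_3] using ih hrest l (3:Int) (out ++ ["R"]) hl0 hl (by norm_num) (by norm_num)
             | simpa [posK_4] using ih hrest (4:Int) r (out ++ ["L"]) (by norm_num) (by norm_num) hr0 hr
             | simpa [posK_4] using ih hrest l (4:Int) (out ++ ["R"]) hl0 hl (by norm_num) (by norm_num)
             | simpa [posK_5] using ih hrest (5:Int) r (out ++ ["L"]) (by norm_num) (by norm_num) hr0 hr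
             | simpa [posK_5] using ih hrest l (5:Int) (out ++ ["R"]) hl0 hl (by norm_num) (by norm_num)
             | simpa [posK_6] using ih hrest (6:Int) r (out ++ ["L"]) (by norm_num) (by norm_num) hr0 hr
             | simpa [posK_6] using ih hrest l (6:Int) (out ++ ["R"]) hl0 hl (by norm_num) (by norm_num)
             | simpa [posK_7] using ih hrest (7:Int) r (out ++ ["L"]) (by norm_num) (by norm_num) hr0 hr
             | simpa [posK_7] using ih hrest l (7:Int) (out ++ ["R"]) hl0 hl (by norm_num) (by norm_num)
             | simpa [posK_8] using ih hrest (8:Int) r (out ++ ["L"]) (by norm_num) (by norm_num) hr0 hr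
             | simpa [posK_8] using ih hrest l (8:Int) (out ++ ["R"]) hl0 hl (by norm_num) (by norm_num)
             | simpa [posK_9] using ih hrest (9:Int) r (out ++ ["L"]) (by norm_num) (by norm_num) hr0 hr
             | simpa [posK_9] using ih hrest l (9:Int) (out ++ ["R"]) hl0 hl (by norm_num) (by norm_num))

-- ===== VERDICT (by name: the statement is the Claim_ definition above) =====
theorem solution_spec : Claim_equal_solution := by
  intro numbers hand _ hpre
  unfold Spec_solution solution solution_alt
  have := loop_eq hand numbers hpre 10 11 [] (by omega) (by omega) (by omega) (by omega)
  simpa [String.join, posK_10, posK_11] using this
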